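-- pv_equiv track=rewrite | github.com/krishnakumarbhat/ArchiMind | services.py | _line_based_split
-- ===== SOURCE A (Python) =====
-- from typing import Dict, List, Optional, Set, Tuple, TypedDict
--
-- def _line_based_split(content: str, step: int = 80) -> List[Tuple[str, int, int]]:
--     lines = content.splitlines()
--     chunks: List[Tuple[str, int, int]] = []
--     for index in range(0, len(lines), step):
--         start = index + 1
--         end = min(len(lines), index + step)
--         chunk = "\n".join(lines[index:end]).strip()
--         if chunk:
--             chunks.append((chunk, start, end))
--     return chunks
-- ===== SOURCE B (Python) =====
-- from typing import List, Tuple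
--
-- def _line_based_split(content: str, step: int = 80) -> List[Tuple[str, int, int]]:
--     lines = content.splitlines()
--     chunks: List[Tuple[str, int, int]] = []
--     buf: List[str] = []
--     block_start = 0
--     for i, line in enumerate(lines):
--         buf.append(line)
--         if len(buf) == step or i == len(lines) - 1:
--             chunk = "\n".join(buf).strip()
--             if chunk:
--                 chunks.append((chunk, block_start + 1, i + 1))
--             buf = []
--             block_start = i + 1
--     return chunks
-- ===== Notes on version B (the rewrite author's own statement) =====
-- stated objective: alternative
-- what changed: Replaces the strided range/slice loop (recomputing start/end and slicing the line list per block) with a single streaming pass over enumerate(lines) that accumulates a buffer and flushes it when it reaches `step` lines or the last line.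
-- outside the precondition, e.g. on _line_based_split('a\nb', -1): A returns [], B returns [('a\nb', 1, 2)]; on _line_based_split('a\nb', 0): A raises ValueError, B returns [('a\nb', 1, 2)]
import Mathlib
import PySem

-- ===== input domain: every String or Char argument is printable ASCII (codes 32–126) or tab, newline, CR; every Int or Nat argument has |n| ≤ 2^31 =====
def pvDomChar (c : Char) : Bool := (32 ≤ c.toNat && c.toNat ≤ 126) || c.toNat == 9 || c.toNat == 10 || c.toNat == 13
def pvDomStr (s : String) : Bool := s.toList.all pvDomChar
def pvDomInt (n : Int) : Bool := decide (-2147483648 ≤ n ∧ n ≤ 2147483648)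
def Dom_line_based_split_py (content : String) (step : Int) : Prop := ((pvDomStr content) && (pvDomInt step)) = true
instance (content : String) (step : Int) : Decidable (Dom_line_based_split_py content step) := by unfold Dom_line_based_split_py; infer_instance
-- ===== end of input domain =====

-- B replaces the strided range/slice loop by a single streaming pass with a line buffer (objective: alternative decomposition, same cost).

-- ===== PORT A =====
-- literal port of _line_based_split: for index in range(0, len(lines), step): slice, join, strip, append
def line_based_split_py (content : String) (step : Int) : List (String × Int × Int) :=
  let lines := PySem.Str.splitlines content
  (PySem.List.pyRange 0 (lines.length : Int) step).foldl
    (fun chunks index =>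
      let start := index + 1
      let stop := min (lines.length : Int) (index + step)
      let chunk := PySem.Str.strip (PySem.Str.join "\n" (PySem.List.slice lines (some index) (some stop)))
      if chunk = "" then chunks else chunks ++ [(chunk, start, stop)])
    []

-- ===== PORT B =====
-- one step of B's streaming loop body: append the line to the buffer, flush when full or at the last line
def pvStepB (n step : Int) (st : List (String × Int × Int) × List String × Int)
    (p : Int × String) : List (String × Int × Int) × List String × Int :=
  let buf := st.2.1 ++ [p.2]
  if (buf.length : Int) = step ∨ p.1 = n - 1 then
    let chunk := PySem.Str.strip (PySem.Str.join "\n" buf)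
    ((if chunk = "" then st.1 else st.1 ++ [(chunk, st.2.2 + 1, p.1 + 1)]), [], p.1 + 1)
  else (st.1, buf, st.2.2)

def line_based_split_py_alt (content : String) (step : Int) : List (String × Int × Int) :=
  let lines := PySem.Str.splitlines content
  ((PySem.List.enumerate lines 0).foldl (pvStepB (lines.length : Int) step) ([], [], 0)).1

-- ===== PRECONDITION & SPEC =====
-- Pre_ excludes step ≤ 0: Python A raises ValueError for step = 0, and for negative step its
-- empty range makes it return [] for a meaningless negative chunk size — a corner nobody specifies,
-- where B's streaming loop naturally yields the whole text as one chunk.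
def Pre_line_based_split_py (content : String) (step : Int) : Prop := 1 ≤ step
instance (content : String) (step : Int) : Decidable (Pre_line_based_split_py content step) := by
  unfold Pre_line_based_split_py; infer_instance

def pvWitness_line_based_split_py : String × Int := ("a\nb\nc", 2)

def Spec_line_based_split_py (content : String) (step : Int) (out : List (String × Int × Int)) : Prop :=
  out = line_based_split_py_alt content step
instance (content : String) (step : Int) (out : List (String × Int × Int)) : Decidable (Spec_line_based_split_py content step out) := by unfold Spec_line_based_split_py; infer_instance

-- ===== CLAIM (what is proved, stated in full; the proofs are below) =====
def Claim_equal_line_based_split_py : Prop := ∀ (content : String) (step : Int), Dom_line_based_split_py content step → Pre_line_based_split_py content step → Spec_line_based_split_py content step (line_based_split_py content step)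


-- ===== LEMMAS AND PROOFS =====

-- common specification: chunks of s+1 lines starting at 0-based line bs
def pvChunks (s bs : Nat) (L : List String) : List (String × Int × Int) :=
  match L with
  | [] => []
  | x :: t =>
    let m := min (s + 1) (x :: t).length
    let c := PySem.Str.strip (PySem.Str.join "\n" ((x :: t).take (s + 1)))
    (if c = "" then [] else [(c, (bs : Int) + 1, ((bs + m : Nat) : Int))]) ++
      pvChunks s (bs + m) ((x :: t).drop (s + 1))
termination_by L.length
decreasing_by simp

theorem pvChunks_nil (s bs : Nat) : pvChunks s bs [] = [] := by rw [pvChunks.eq_def]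

theorem pvChunks_cons (s bs : Nat) (x : String) (t : List String) :
    pvChunks s bs (x :: t)
    = (if PySem.Str.strip (PySem.Str.join "\n" ((x :: t).take (s + 1))) = "" then []
       else [(PySem.Str.strip (PySem.Str.join "\n" ((x :: t).take (s + 1))), (bs : Int) + 1,
              ((bs + min (s + 1) (x :: t).length : Nat) : Int))]) ++
      pvChunks s (bs + min (s + 1) (x :: t).length) ((x :: t).drop (s + 1)) := by
  rw [pvChunks.eq_def]

theorem pyRange_pos_nil (a b st : Int) (h : 0 < st) (hb : b ≤ a) :
    PySem.List.pyRange a b st = [] := by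
  rw [PySem.List.pyRange_of_pos _ _ h, if_neg (by omega)]
  simp

theorem pyRange_pos_cons (a b st : Int) (h : 0 < st) (hb : a < b) :
    PySem.List.pyRange a b st = a :: PySem.List.pyRange (a + st) b st := by
  rw [PySem.List.pyRange_of_pos _ _ h, PySem.List.pyRange_of_pos _ _ h, if_pos hb]
  have hdiv : (b - a + st - 1) / st = (b - a - 1) / st + 1 := by
    have : b - a + st - 1 = (b - a - 1) + 1 * st := by ring
    rw [this, Int.add_mul_ediv_right _ _ (by omega)]
  have hnn : 0 ≤ (b - a - 1) / st := Int.ediv_nonneg (by omega) (by omega)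
  have hcount : ((b - a + st - 1) / st).toNat = ((b - a - 1) / st).toNat + 1 := by
    rw [hdiv]; omega
  rw [hcount]
  by_cases hc : a + st < b
  · have : (b - (a + st) + st - 1) = b - a - 1 := by ring
    rw [if_pos hc, this, List.range_succ_eq_map]
    simp only [List.map_cons, List.map_map]
    refine congrArg₂ List.cons (by push_cast; ring) ?_
    apply List.map_congr_left; intro k _; simp only [Function.comp_apply]; push_cast; ring
  · have h0 : (b - a - 1) / st = 0 := Int.ediv_eq_zero_of_lt (by omega) (by omega)
    rw [if_neg hc, h0]
    simp [List.range_succ_eq_map]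

-- A's strided fold from line bs computes pvChunks on the remaining lines
theorem A_fold (s : Nat) (full : List String) :
    ∀ (k : Nat) (R : List String) (bs : Nat) (acc : List (String × Int × Int)),
      R.length = k → R = full.drop bs → bs + R.length = full.length →
      (PySem.List.pyRange (bs : Int) (full.length : Int) ((s : Int) + 1)).foldl
        (fun chunks index =>
          let start := index + 1
          let stop := min ((full.length : Nat) : Int) (index + ((s : Int) + 1))
          let chunk := PySem.Str.strip (PySem.Str.join "\n" (PySem.List.slice full (some index) (some stop)))
          if chunk = "" then chunks else chunks ++ [(chunk, start, stop)]) acc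
      = acc ++ pvChunks s bs R := by
  intro k
  induction k using Nat.strong_induction_on with
  | _ k ih =>
    intro R bs acc hk hR hlen
    match R, hk with
    | [], hk =>
      have hbs : (full.length : Int) ≤ (bs : Int) := by simp at hlen; omega
      rw [pyRange_pos_nil _ _ _ (by omega) hbs]
      simp [pvChunks_nil]
    | x :: t, hk =>
      have hlt : (bs : Int) < (full.length : Int) := by simp at hlen ⊢; omega
      rw [pyRange_pos_cons _ _ _ (by omega) hlt, List.foldl_cons]
      have hm : min ((full.length : Nat) : Int) ((bs : Int) + ((s : Int) + 1))
          = ((bs + min (s + 1) (x :: t).length : Nat) : Int) := by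
        simp at hlen ⊢; omega
      have hslice : PySem.List.slice full (some (bs : Int))
          (some ((bs + min (s + 1) (x :: t).length : Nat) : Int))
          = (x :: t).take (s + 1) := by
        rw [PySem.List.slice_natCast]
        have hdrop : full.drop bs = x :: t := hR.symm
        rw [hdrop]
        have h2 : bs + min (s + 1) (x :: t).length - bs = min (s + 1) (x :: t).length := by omega
        rw [h2]
        by_cases hle : s + 1 ≤ (x :: t).length
        · rw [min_eq_left hle]
        · push_neg at hle
          rw [min_eq_right (le_of_lt hle), List.take_length, List.take_of_length_le (le_of_lt hle)]
      simp only [hm, hslice]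
      set m := min (s + 1) (x :: t).length with hmdef
      set c := PySem.Str.strip (PySem.Str.join "\n" ((x :: t).take (s + 1))) with hcdef
      have hnext : (bs : Int) + ((s : Int) + 1) = ((bs + (s + 1) : Nat) : Int) := by push_cast; ring
      have hbody : (if c = "" then acc else acc ++ [(c, (bs : Int) + 1, ((bs + m : Nat) : Int))])
          = acc ++ (if c = "" then [] else [(c, (bs : Int) + 1, ((bs + m : Nat) : Int))]) := by
        split <;> simp [pvChunks_nil]
      by_cases hbig : s + 1 < (x :: t).length
      · -- full block of s+1 lines; recurse
        have hmfull : m = s + 1 := by omega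
        have hrec := ih (t.length - s) (by simp at hk; omega) ((x :: t).drop (s + 1)) (bs + (s + 1))
          (acc ++ (if c = "" then [] else [(c, (bs : Int) + 1, ((bs + m : Nat) : Int))]))
          (by simp) (by rw [hR, List.drop_drop]) (by simp at hlen ⊢; try omega)
        rw [hbody, hnext, hrec, pvChunks_cons, ← hmdef, ← hcdef, hmfull, List.append_assoc]
      · -- final (possibly partial) block: both sides stop after this block
        push_neg at hbig
        have hlenx : bs + t.length + 1 = full.length := by simp at hlen; omega
        have hbigx : t.length + 1 ≤ s + 1 := by simp at hbig; omega
        have hnil1 : PySem.List.pyRange ((bs + (s + 1) : Nat) : Int) (full.length : Int) ((s : Int) + 1) = [] := by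
          apply pyRange_pos_nil _ _ _ (by omega)
          push_cast
          omega
        rw [hnext, hnil1, List.foldl_nil]
        have hdropnil : (x :: t).drop (s + 1) = [] := List.drop_eq_nil_of_le hbig
        rw [pvChunks_cons, ← hmdef, ← hcdef, hdropnil, pvChunks_nil, hbody]
        simp

-- B's streaming fold with buffer buf and block start bs computes pvChunks on buf ++ R
theorem B_fold (s n : Nat) :
    ∀ (R buf : List String) (bs : Nat) (acc : List (String × Int × Int)),
      buf.length < s + 1 → bs + buf.length + R.length = n → (R = [] → buf = []) →
      ((PySem.List.enumerate R (((bs + buf.length : Nat) : Int))).foldl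
        (pvStepB ((n : Nat) : Int) ((s : Int) + 1)) (acc, buf, (bs : Int))).1
      = acc ++ pvChunks s bs (buf ++ R) := by
  intro R
  induction R with
  | nil =>
    intro buf bs acc hbuf hn hnil
    rw [hnil rfl]
    simp [PySem.List.enumerate_nil, pvChunks_nil]
  | cons x R' ih =>
    intro buf bs acc hbuf hn hnil
    rw [PySem.List.enumerate_cons, List.foldl_cons]
    have hstep : pvStepB ((n : Nat) : Int) ((s : Int) + 1) (acc, buf, (bs : Int))
        (((bs + buf.length : Nat) : Int), x)
        = if (((buf ++ [x]).length : Nat) : Int) = (s : Int) + 1 ∨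
              ((bs + buf.length : Nat) : Int) = ((n : Nat) : Int) - 1 then
            ((if PySem.Str.strip (PySem.Str.join "\n" (buf ++ [x])) = "" then acc
              else acc ++ [(PySem.Str.strip (PySem.Str.join "\n" (buf ++ [x])), (bs : Int) + 1,
                            ((bs + buf.length : Nat) : Int) + 1)]), [],
             ((bs + buf.length : Nat) : Int) + 1)
          else (acc, buf ++ [x], (bs : Int)) := rfl
    rw [hstep]
    have hlen2 : (buf ++ [x]).length = buf.length + 1 := by simp
    by_cases hcond : (((buf ++ [x]).length : Nat) : Int) = (s : Int) + 1 ∨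
        ((bs + buf.length : Nat) : Int) = ((n : Nat) : Int) - 1
    · -- flush the buffer
      rw [if_pos hcond]
      set c := PySem.Str.strip (PySem.Str.join "\n" (buf ++ [x])) with hcdef
      have hidx : ((bs + buf.length : Nat) : Int) + 1 = ((bs + (buf ++ [x]).length : Nat) : Int) := by
        rw [hlen2]; push_cast; ring
      rw [hidx]
      have hrec := ih [] (bs + (buf ++ [x]).length)
        (if c = "" then acc
         else acc ++ [(c, (bs : Int) + 1, ((bs + (buf ++ [x]).length : Nat) : Int))])
        (by simp) (by simp only [List.length_append, List.length_cons, List.length_nil] at hn ⊢; omega) (fun _ => rfl)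
      simp only [List.length_nil, Nat.add_zero, List.nil_append] at hrec
      rw [hrec]
      have hlist : buf ++ x :: R' = (buf ++ [x]) ++ R' := by simp
      rw [hlist]
      rcases hcond with hfull | hlast
      · -- the buffer reached s + 1 lines
        have hfull' : (buf ++ [x]).length = s + 1 := by exact_mod_cast hfull
        obtain ⟨y, t, hyt⟩ : ∃ y t, (buf ++ [x]) ++ R' = y :: t := by
          cases h : (buf ++ [x]) ++ R' with
          | nil => simp at h
          | cons y t => exact ⟨y, t, rfl⟩
        rw [hyt, pvChunks_cons, ← hyt]
        have hm : min (s + 1) ((buf ++ [x]) ++ R').length = s + 1 := by simp at hfull' ⊢; omega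
        have htake : ((buf ++ [x]) ++ R').take (s + 1) = buf ++ [x] := by
          rw [← hfull', List.take_left]
        have hdrop : ((buf ++ [x]) ++ R').drop (s + 1) = R' := by
          rw [← hfull', List.drop_left]
        rw [hm, htake, hdrop, ← hcdef, ← hfull']
        split <;> simp [pvChunks_nil]
      · -- the last line of the whole input
        have hn1 : bs + buf.length + 1 = n := by omega
        have hR0 : R'.length = 0 := by simp at hn; omega
        have hR' : R' = [] := List.eq_nil_of_length_eq_zero hR0
        subst hR'
        obtain ⟨y, t, hyt⟩ : ∃ y t, (buf ++ [x]) ++ ([] : List String) = y :: t := by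
          cases h : (buf ++ [x]) ++ ([] : List String) with
          | nil => simp at h
          | cons y t => exact ⟨y, t, rfl⟩
        rw [hyt, pvChunks_cons, ← hyt]
        have hle : ((buf ++ [x]) ++ ([] : List String)).length ≤ s + 1 := by
          simp at hbuf ⊢; omega
        have hm : min (s + 1) ((buf ++ [x]) ++ ([] : List String)).length
            = ((buf ++ [x]) ++ ([] : List String)).length := by omega
        have htake : ((buf ++ [x]) ++ ([] : List String)).take (s + 1)
            = buf ++ [x] := by
          rw [List.take_of_length_le hle]; simp
        have hdrop : ((buf ++ [x]) ++ ([] : List String)).drop (s + 1) = [] :=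
          List.drop_eq_nil_of_le hle
        rw [hm, htake, hdrop, ← hcdef, pvChunks_nil]
        split <;> simp [pvChunks_nil]
    · -- keep filling the buffer
      rw [if_neg hcond]
      push_neg at hcond
      obtain ⟨hnotfull, hnotlast⟩ := hcond
      have hbuf2lt : (buf ++ [x]).length < s + 1 := by
        have h1 : ((buf ++ [x]).length : Int) ≠ (s : Int) + 1 := hnotfull
        rw [hlen2] at h1 ⊢
        omega
      have hR'ne : R' ≠ [] := by
        intro h
        subst h
        apply hnotlast
        simp at hn ⊢
        omega
      have hidx : ((bs + buf.length : Nat) : Int) + 1 = ((bs + (buf ++ [x]).length : Nat) : Int) := by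
        rw [hlen2]; push_cast; ring
      have hrec := ih (buf ++ [x]) bs acc hbuf2lt
        (by simp only [List.length_append, List.length_cons, List.length_nil] at hn ⊢; omega) (fun h => absurd h hR'ne)
      rw [hidx, hrec]
      simp

-- ===== VERDICT (by name: the statement is the Claim_ definition above) =====
theorem line_based_split_py_spec : Claim_equal_line_based_split_py := by
  intro content step _ hpre
  unfold Spec_line_based_split_py
  obtain ⟨s, hs⟩ : ∃ s : Nat, step = (s : Int) + 1 :=
    ⟨(step - 1).toNat, by unfold Pre_line_based_split_py at hpre; omega⟩
  subst hs
  simp only [line_based_split_py, line_based_split_py_alt]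
  have hA := A_fold s (PySem.Str.splitlines content) (PySem.Str.splitlines content).length
    (PySem.Str.splitlines content) 0 [] rfl (by simp) (by simp)
  have hB := B_fold s (PySem.Str.splitlines content).length (PySem.Str.splitlines content)
    [] 0 [] (by simp) (by simp) (by simp)
  simp only [Nat.cast_zero] at hA
  rw [hA]
  have hB' : ((PySem.List.enumerate (PySem.Str.splitlines content) 0).foldl
      (pvStepB (((PySem.Str.splitlines content).length : Nat) : Int) ((s : Int) + 1)) ([], [], 0)).1
      = pvChunks s 0 (PySem.Str.splitlines content) := by simpa using hB
  exact hB'.symm
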